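-- pv_equiv track=rewrite | github.com/mfleury89/algo-dev | dice_game.py | find_the_best_dice
-- ===== SOURCE A (Python) =====
-- from itertools import combinations
--
-- def count_wins(dice1, dice2):
--     assert len(dice1) == 6 and len(dice2) == 6
--     dice1_wins, dice2_wins = 0, 0
--
--     for i in dice1:
--         for j in dice2:
--             if i > j:
--                 dice1_wins += 1
--             if j > i:
--                 dice2_wins += 1
--
--     return dice1_wins, dice2_wins
--
-- def find_the_best_dice(dices, loses_to):
--     assert all(len(dice) == 6 for dice in dices)
--
--     for i in range(len(dices)):
--         loses_to[i] = []
--     pairs = combinations(range(len(dices)), 2)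
--     for pair in pairs:
--         wins = count_wins(dices[pair[0]], dices[pair[1]])
--         if wins[0] < wins[1]:
--             loses_to[pair[0]].append((pair[1], wins[1]))
--         if wins[1] < wins[0]:
--             loses_to[pair[1]].append((pair[0], wins[0]))
--
--     for die, losses in loses_to.items():
--         if len(losses) == 0:
--             return die
--     return -1
-- ===== SOURCE B (Python) =====
-- # B: sort each die's faces once, then count pairwise wins with a recursive
-- # two-pointer merge over the sorted faces (instead of A's nested 36-comparison
-- # loops), and build each die's loss list directly per die instead of A's single
-- # combinations pass that updates both losers at once.  Like A it rewrites the
-- # loses_to dict in place; the equivalence claimed is about the return value.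
--
-- def merge_wins(xs, ys, consumed=0):
--     # xs, ys sorted ascending; number of pairs (a, b) with a in xs, b in ys, a > b
--     if not xs:
--         return 0
--     if ys and ys[0] < xs[0]:
--         return merge_wins(xs, ys[1:], consumed + 1)
--     return consumed + merge_wins(xs[1:], ys, consumed)
--
-- def find_the_best_dice(dices, loses_to):
--     assert all(len(dice) == 6 for dice in dices)
--     n = len(dices)
--     S = [sorted(dice) for dice in dices]
--     for i in range(n):
--         loses_to[i] = [(j, merge_wins(S[j], S[i]))
--                        for j in range(n)
--                        if j != i and merge_wins(S[i], S[j]) < merge_wins(S[j], S[i])]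
--     for die, losses in loses_to.items():
--         if not losses:
--             return die
--     return -1
-- ===== Notes on version B (the rewrite author's own statement) =====
-- stated objective: alternative
-- what changed: A counts each pairwise matchup with nested 6x6 comparison loops inside one combinations pass that updates both losers at once; B sorts every die's faces up front and counts wins with a recursive two-pointer merge over the sorted faces, building each die's loss list directly in its own per-die pass before the first-loss-free scan.
import Mathlib
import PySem

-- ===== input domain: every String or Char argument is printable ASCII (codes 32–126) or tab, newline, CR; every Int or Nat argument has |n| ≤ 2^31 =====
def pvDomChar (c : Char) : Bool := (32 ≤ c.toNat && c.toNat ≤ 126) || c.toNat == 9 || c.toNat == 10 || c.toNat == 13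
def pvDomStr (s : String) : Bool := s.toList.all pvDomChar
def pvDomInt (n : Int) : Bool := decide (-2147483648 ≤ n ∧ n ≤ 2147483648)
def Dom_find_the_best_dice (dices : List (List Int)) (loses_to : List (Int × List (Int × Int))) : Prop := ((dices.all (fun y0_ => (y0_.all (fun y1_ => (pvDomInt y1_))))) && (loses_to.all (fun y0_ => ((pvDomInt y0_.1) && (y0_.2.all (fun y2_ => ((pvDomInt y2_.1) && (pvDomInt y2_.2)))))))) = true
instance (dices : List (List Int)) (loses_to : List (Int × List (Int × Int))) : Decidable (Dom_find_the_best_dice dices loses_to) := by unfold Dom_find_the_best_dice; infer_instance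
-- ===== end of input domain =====

-- B sorts each die's faces and counts pairwise wins by a recursive two-pointer merge,
-- building each die's loss list directly per die (A: nested 36-comparison counts over one
-- combinations pass); same cost class; both rewrite the loses_to dict identically, and the
-- equivalence proved is about the return value.


-- ===== PORT A =====
def count_wins (dice1 dice2 : List Int) : Int × Int :=
  dice1.foldl (fun acc i =>
    dice2.foldl (fun acc j =>
      let acc := if i > j then (acc.1 + 1, acc.2) else acc
      if j > i then (acc.1, acc.2 + 1) else acc) acc) (0, 0)

-- the final 'for die, losses in loses_to.items(): if len(losses) == 0: return die / return -1'
def findFirstEmptyA : List (Int × List (Int × Int)) → Int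
  | [] => -1
  | (die, losses) :: rest => if losses.length == 0 then die else findFirstEmptyA rest

-- itertools.combinations(range(n), 2) in its exact order
def combPairs (n : Int) : List (Int × Int) :=
  (PySem.List.pyRange 0 n 1).flatMap (fun i => (PySem.List.pyRange (i + 1) n 1).map (fun j => (i, j)))

-- indices pair[0]/pair[1] are always in range, so pyGetD is exact; loses_to[k].append on a key
-- set in the first loop is Dict.modify with default [] (the key is always present).
def find_the_best_dice (dices : List (List Int)) (loses_to : List (Int × List (Int × Int))) : Int :=
  let n : Int := (dices.length : Int)
  let d := (PySem.List.pyRange 0 n 1).foldl (fun d i => d.insert i ([] : List (Int × Int))) (PySem.Dict.mk loses_to)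
  let d := (combPairs n).foldl (fun d p =>
      let wins := count_wins (PySem.List.pyGetD dices p.1 []) (PySem.List.pyGetD dices p.2 [])
      let d := if wins.1 < wins.2 then d.modify p.1 [] (fun l => l ++ [(p.2, wins.2)]) else d
      if wins.2 < wins.1 then d.modify p.2 [] (fun l => l ++ [(p.1, wins.1)]) else d) d
  findFirstEmptyA d.items

-- ===== PORT B =====
-- merge_wins(xs, ys, consumed): recursive two-pointer merge; 'ys[1:]'/'xs[1:]' are the tails
def merge_wins : List Int → List Int → Int → Int
  | [], _, _ => 0
  | a :: xs, b :: ys, c => if b < a then merge_wins (a :: xs) ys (c + 1) else c + merge_wins xs (b :: ys) c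
  | _ :: xs, [], c => c + merge_wins xs [] c
termination_by xs ys _ => xs.length + ys.length

def find_the_best_dice_alt (dices : List (List Int)) (loses_to : List (Int × List (Int × Int))) : Int :=
  let n : Int := (dices.length : Int)
  let S := dices.map (fun dice => PySem.List.sorted dice (fun x => x) false)
  let d := (PySem.List.pyRange 0 n 1).foldl (fun d i =>
      d.insert i (((PySem.List.pyRange 0 n 1).filter (fun j =>
          decide (j ≠ i ∧ merge_wins (PySem.List.pyGetD S i []) (PySem.List.pyGetD S j []) 0
            < merge_wins (PySem.List.pyGetD S j []) (PySem.List.pyGetD S i []) 0))).map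
        (fun j => (j, merge_wins (PySem.List.pyGetD S j []) (PySem.List.pyGetD S i []) 0))))
    (PySem.Dict.mk loses_to)
  match d.items.find? (fun kv => kv.2.isEmpty) with
  | some kv => kv.1
  | none => -1

-- ===== PRECONDITION & SPEC =====
-- Pre_ keeps exactly the inputs where A returns: every die has 6 faces (A asserts this), and —
-- because a Python dict cannot hold duplicate keys — the assoc list encoding loses_to has
-- pairwise-distinct keys (duplicates do not encode any Python input).
def Pre_find_the_best_dice (dices : List (List Int)) (loses_to : List (Int × List (Int × Int))) : Prop :=
  (∀ dice ∈ dices, dice.length = 6) ∧ (loses_to.map Prod.fst).Nodup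
instance (dices : List (List Int)) (loses_to : List (Int × List (Int × Int))) : Decidable (Pre_find_the_best_dice dices loses_to) := by unfold Pre_find_the_best_dice; infer_instance

def pvWitness_find_the_best_dice : List (List Int) × (List (Int × List (Int × Int))) :=
  ([[1, 1, 1, 1, 1, 1], [2, 2, 2, 2, 2, 2]], [])

def Spec_find_the_best_dice (dices : List (List Int)) (loses_to : List (Int × List (Int × Int))) (out : Int) : Prop := out = find_the_best_dice_alt dices loses_to
instance (dices : List (List Int)) (loses_to : List (Int × List (Int × Int))) (out : Int) : Decidable (Spec_find_the_best_dice dices loses_to out) := by unfold Spec_find_the_best_dice; infer_instance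

-- ===== CLAIM (what is proved, stated in full; the proofs are below) =====
def Claim_equal_find_the_best_dice : Prop := ∀ (dices : List (List Int)) (loses_to : List (Int × List (Int × Int))), Dom_find_the_best_dice dices loses_to → Pre_find_the_best_dice dices loses_to → Spec_find_the_best_dice dices loses_to (find_the_best_dice dices loses_to)


-- ===== LEMMAS AND PROOFS =====

-- proof-side abbreviation: the win count of die i against die j, as a nested sum
def pairWins (dice1 dice2 : List Int) : Int :=
  dice1.foldl (fun s a => dice2.foldl (fun s b => if a > b then s + 1 else s) s) 0

def fW (dices : List (List Int)) (i j : Int) : Int :=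
  pairWins (PySem.List.pyGetD dices i []) (PySem.List.pyGetD dices j [])

-- the (key, appended value) operations A's pair loop performs for one pair
def opf (dices : List (List Int)) (p : Int × Int) : List (Int × (Int × Int)) :=
  (if fW dices p.1 p.2 < fW dices p.2 p.1 then [(p.1, (p.2, fW dices p.2 p.1))] else []) ++
  (if fW dices p.2 p.1 < fW dices p.1 p.2 then [(p.2, (p.1, fW dices p.1 p.2))] else [])

def opsList (dices : List (List Int)) (n : Int) : List (Int × (Int × Int)) :=
  (combPairs n).flatMap (opf dices)

-- the loss list of die c
def lossList (dices : List (List Int)) (n c : Int) : List (Int × Int) :=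
  ((PySem.List.pyRange 0 n 1).filter (fun j => decide (j ≠ c ∧ fW dices c j < fW dices j c))).map
    (fun j => (j, fW dices j c))

lemma sum_swap (x y : List Int) (h : Int → Int → Int) :
    (x.map (fun a => (y.map (fun b => h a b)).sum)).sum
      = (y.map (fun b => (x.map (fun a => h a b)).sum)).sum := by
  induction x with
  | nil => simp
  | cons a t ih =>
    simp only [List.map_cons, List.sum_cons, ih]
    rw [← PySem.List.sum_map_add_int]

lemma pw_inner (a : Int) (y : List Int) (s : Int) :
    y.foldl (fun s b => if a > b then s + 1 else s) s
      = s + (y.map (fun b => if a > b then (1:Int) else 0)).sum := by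
  induction y generalizing s with
  | nil => simp
  | cons b t ih =>
    simp only [List.foldl_cons, List.map_cons, List.sum_cons, ih]
    split <;> omega

lemma pairWins_eq_sum (x y : List Int) :
    pairWins x y = (x.map (fun a => (y.map (fun b => if a > b then (1:Int) else 0)).sum)).sum := by
  unfold pairWins
  have hfun : (fun (s : Int) (a : Int) => y.foldl (fun s b => if a > b then s + 1 else s) s)
      = fun s a => s + (y.map (fun b => if a > b then (1:Int) else 0)).sum := by
    funext s a; exact pw_inner a y s
  rw [hfun, PySem.List.foldl_add]
  simp

lemma cw_inner (i : Int) (y : List Int) (acc : Int × Int) :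
    y.foldl (fun acc j =>
        let acc := if i > j then (acc.1 + 1, acc.2) else acc
        if j > i then (acc.1, acc.2 + 1) else acc) acc
      = (acc.1 + (y.map (fun b => if i > b then (1:Int) else 0)).sum,
         acc.2 + (y.map (fun b => if b > i then (1:Int) else 0)).sum) := by
  induction y generalizing acc with
  | nil => simp
  | cons b t ih =>
    rw [List.foldl_cons, ih]
    simp only [List.map_cons, List.sum_cons, Prod.mk.injEq]
    split_ifs <;> simp <;> omega

lemma count_wins_eq (x y : List Int) : count_wins x y = (pairWins x y, pairWins y x) := by
  unfold count_wins
  have main : ∀ acc : Int × Int, x.foldl (fun acc i =>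
      y.foldl (fun acc j =>
        let acc := if i > j then (acc.1 + 1, acc.2) else acc
        if j > i then (acc.1, acc.2 + 1) else acc) acc) acc
      = (acc.1 + (x.map (fun a => (y.map (fun b => if a > b then (1:Int) else 0)).sum)).sum,
         acc.2 + (x.map (fun a => (y.map (fun b => if b > a then (1:Int) else 0)).sum)).sum) := by
    intro acc
    induction x generalizing acc with
    | nil => simp
    | cons a t ih =>
      rw [List.foldl_cons, ih, cw_inner]
      simp only [List.map_cons, List.sum_cons, Prod.mk.injEq]
      constructor <;> omega
  rw [main (0,0), pairWins_eq_sum x y, pairWins_eq_sum y x, sum_swap y x]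
  simp

-- ===== correctness of the merge count =====
lemma merge_wins_eq_sum (xs ys : List Int) (c : Int)
    (hxs : xs.Pairwise (· ≤ ·)) (hys : ys.Pairwise (· ≤ ·)) :
    merge_wins xs ys c
      = (xs.map (fun a => c + (ys.map (fun b => if a > b then (1:Int) else 0)).sum)).sum := by
  induction xs, ys, c using merge_wins.induct with
  | case1 ys c => rw [merge_wins]; simp
  | case2 a xs b ys c hba ih =>
    rw [merge_wins, if_pos hba, ih hxs (List.pairwise_cons.mp hys).2]
    refine congrArg List.sum (List.map_congr_left ?_)
    intro a' ha'
    have haa' : a ≤ a' := by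
      rcases List.mem_cons.mp ha' with rfl | h
      · exact le_refl a'
      · exact (List.pairwise_cons.mp hxs).1 a' h
    have : b < a' := lt_of_lt_of_le hba haa'
    simp only [List.map_cons, List.sum_cons, if_pos (show a' > b from this)]
    omega
  | case3 a xs b ys c hba ih =>
    rw [merge_wins, if_neg hba,
      ih (List.pairwise_cons.mp hxs).2 hys]
    have hSa : ((ys.map (fun b' => if a > b' then (1:Int) else 0)).sum) = 0 := by
      apply List.sum_eq_zero
      intro x hx
      obtain ⟨b', hb', rfl⟩ := List.mem_map.mp hx
      have hbb' := (List.pairwise_cons.mp hys).1 b' hb'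
      rw [if_neg (by omega)]
    simp only [List.map_cons, List.sum_cons, if_neg hba, hSa, gt_iff_lt]
    simp
  | case4 a xs c ih =>
    rw [merge_wins, ih (List.pairwise_cons.mp hxs).2 List.Pairwise.nil]
    simp

lemma sum_map_perm {α : Type} (x y : List α) (h : x.Perm y) (f : α → Int) :
    (x.map f).sum = (y.map f).sum := (h.map f).sum_eq

lemma merge_wins_sorted (x y : List Int) :
    merge_wins (PySem.List.sorted x (fun v => v) false) (PySem.List.sorted y (fun v => v) false) 0
      = pairWins x y := by
  rw [merge_wins_eq_sum _ _ 0 (PySem.List.sorted_pairwise x (fun v => v))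
      (PySem.List.sorted_pairwise y (fun v => v)),
    pairWins_eq_sum]
  simp only [zero_add]
  rw [sum_map_perm _ x (PySem.List.sorted_perm x (fun v => v) false)]
  refine congrArg List.sum (List.map_congr_left ?_)
  intro a _
  exact sum_map_perm _ y (PySem.List.sorted_perm y (fun v => v) false) _

lemma getD_foldl_insert_fun {v : Type} (l : List Int) (L : Int → v) (d : PySem.Dict Int v)
    (c : Int) (dflt : v) :
    (l.foldl (fun d i => d.insert i (L i)) d).getD c dflt = if c ∈ l then L c else d.getD c dflt := by
  induction l generalizing d with
  | nil => simp
  | cons i t ih =>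
    simp only [List.foldl_cons, ih, PySem.Dict.getD_insert]
    by_cases h1 : c ∈ t <;> by_cases h2 : c = i <;> simp [h1, h2]

lemma flatMap_if_singleton {α β : Type} (l : List α) (p : α → Prop) [DecidablePred p] (f : α → β) :
    l.flatMap (fun x => if p x then [f x] else []) = (l.filter (fun x => decide (p x))).map f := by
  induction l with
  | nil => simp
  | cons a t ih =>
    by_cases hp : p a <;> simp [hp, ih]

lemma flatMap_single_support {β : Type} (l : List Int) (c : Int) (h : Int → List β)
    (hn : l.Nodup) (hc : c ∈ l) (hz : ∀ j ∈ l, j ≠ c → h j = []) : l.flatMap h = h c := by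
  induction l with
  | nil => simp at hc
  | cons a t ih =>
    rcases List.mem_cons.mp hc with rfl | hct
    · have : t.flatMap h = [] := by
        apply List.flatMap_eq_nil_iff.mpr
        intro j hj
        exact hz j (List.mem_cons_of_mem _ hj) (fun hje => (List.nodup_cons.mp hn).1 (hje ▸ hj))
      simp [this]
    · have ha : h a = [] := hz a (List.mem_cons_self) (fun hae => (List.nodup_cons.mp hn).1 (hae ▸ hct))
      simp [ha, ih (List.nodup_cons.mp hn).2 hct (fun j hj => hz j (List.mem_cons_of_mem _ hj))]

lemma mem_combPairs (n : Int) (p : Int × Int) (hp : p ∈ combPairs n) :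
    0 ≤ p.1 ∧ p.1 < p.2 ∧ p.2 < n := by
  unfold combPairs at hp
  simp only [List.mem_flatMap, List.mem_map] at hp
  obtain ⟨i, hi, j, hj, rfl⟩ := hp
  rw [PySem.List.mem_pyRange_one] at hi hj
  exact ⟨hi.1, by omega, hj.2⟩

lemma opsList_key_mem (dices : List (List Int)) (n : Int) (q : Int × (Int × Int))
    (hq : q ∈ opsList dices n) : 0 ≤ q.1 ∧ q.1 < n := by
  unfold opsList at hq
  simp only [List.mem_flatMap] at hq
  obtain ⟨p, hp, hq⟩ := hq
  have hb := mem_combPairs n p hp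
  unfold opf at hq
  rcases List.mem_append.mp hq with h | h <;> split at h <;> simp at h <;> subst h <;> simp <;> omega

lemma ops_filter_out (dices : List (List Int)) (n c : Int) (hc : ¬ (0 ≤ c ∧ c < n)) :
    (opsList dices n).filter (fun q => q.1 == c) = [] := by
  apply List.filter_eq_nil_iff.mpr
  intro q hq
  have := opsList_key_mem dices n q hq
  simp only [beq_iff_eq]
  omega

lemma opf_filter_eval (dices : List (List Int)) (c i j : Int) (hij : i ≠ j) :
    ((opf dices (i, j)).filter (fun q => q.1 == c)).map (fun q => q.2)
      = if i = c then (if fW dices c j < fW dices j c then [(j, fW dices j c)] else [])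
        else if j = c then (if fW dices c i < fW dices i c then [(i, fW dices i c)] else [])
        else [] := by
  by_cases hic : i = c
  · subst hic
    rw [if_pos rfl]
    unfold opf
    by_cases hw1 : fW dices i j < fW dices j i <;> by_cases hw2 : fW dices j i < fW dices i j
    · exact absurd hw2 (by omega)
    · simp [hw1, hw2]
    · simp [hw1, hw2, Ne.symm hij]
    · simp [hw1, hw2]
  · rw [if_neg hic]
    by_cases hjc : j = c
    · subst hjc
      rw [if_pos rfl]
      unfold opf
      by_cases hw1 : fW dices i j < fW dices j i <;> by_cases hw2 : fW dices j i < fW dices i j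
      · exact absurd hw2 (by omega)
      · simp [hw1, hw2, hic]
      · simp [hw1, hw2]
      · simp [hw1, hw2]
    · rw [if_neg hjc]
      unfold opf
      by_cases hw1 : fW dices i j < fW dices j i <;> by_cases hw2 : fW dices j i < fW dices i j <;>
        first
        | exact absurd hw2 (by omega)
        | simp [hw1, hw2, hic, hjc]

lemma ops_filter (dices : List (List Int)) (n c : Int) (h0 : 0 ≤ c) (h1 : c < n) :
    ((opsList dices n).filter (fun q => q.1 == c)).map (fun q => q.2) = lossList dices n c := by
  unfold opsList combPairs lossList
  rw [List.flatMap_assoc]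
  simp only [List.filter_flatMap, List.map_flatMap]
  have hsplit : PySem.List.pyRange 0 n 1
      = PySem.List.pyRange 0 c 1 ++ c :: PySem.List.pyRange (c + 1) n 1 := by
    rw [PySem.List.pyRange_one_append 0 c n h0 (le_of_lt h1), PySem.List.pyRange_one_cons h1]
  rw [hsplit]
  simp only [List.flatMap_append, List.flatMap_cons, List.filter_append, List.map_append]
  -- part 1: groups i < c
  have hp1 : (PySem.List.pyRange 0 c 1).flatMap (fun i =>
        ((PySem.List.pyRange (i + 1) n 1).map (fun j => (i, j))).flatMap (fun a =>
          (List.filter (fun q => q.1 == c) (opf dices a)).map (fun q => q.2)))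
      = ((PySem.List.pyRange 0 c 1).filter
          (fun j => decide (j ≠ c ∧ fW dices c j < fW dices j c))).map (fun j => (j, fW dices j c)) := by
    rw [List.flatMap_congr (g := fun i =>
        if i ≠ c ∧ fW dices c i < fW dices i c then [(i, fW dices i c)] else []) ?_]
    · exact flatMap_if_singleton _ _ _
    · intro i hi
      rw [PySem.List.mem_pyRange_one] at hi
      rw [List.flatMap_map]
      rw [flatMap_single_support _ c _ (PySem.List.nodup_pyRange_one _ _)
          (PySem.List.mem_pyRange_one.mpr (by omega)) ?_]
      · rw [opf_filter_eval dices c i c (by omega)]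
        rw [if_neg (by omega), if_pos rfl]
        have : (i ≠ c ∧ fW dices c i < fW dices i c) ↔ fW dices c i < fW dices i c := by
          constructor
          · exact fun h => h.2
          · exact fun h => ⟨by omega, h⟩
        rw [if_congr this.symm rfl rfl]
      · intro j hj hjc
        rw [PySem.List.mem_pyRange_one] at hj
        rw [opf_filter_eval dices c i j (by omega), if_neg (by omega), if_neg hjc]
  -- part 2: group i = c
  have hp2 : ((PySem.List.pyRange (c + 1) n 1).map (fun j => (c, j))).flatMap (fun a =>
        (List.filter (fun q => q.1 == c) (opf dices a)).map (fun q => q.2))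
      = ((c :: PySem.List.pyRange (c + 1) n 1).filter
          (fun j => decide (j ≠ c ∧ fW dices c j < fW dices j c))).map (fun j => (j, fW dices j c)) := by
    rw [List.filter_cons, if_neg (by simp)]
    rw [List.flatMap_map]
    rw [List.flatMap_congr (g := fun j =>
        if j ≠ c ∧ fW dices c j < fW dices j c then [(j, fW dices j c)] else []) ?_]
    · exact flatMap_if_singleton _ _ _
    · intro j hj
      rw [PySem.List.mem_pyRange_one] at hj
      rw [opf_filter_eval dices c c j (by omega), if_pos rfl]
      have : (j ≠ c ∧ fW dices c j < fW dices j c) ↔ fW dices c j < fW dices j c :=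
        ⟨fun h => h.2, fun h => ⟨by omega, h⟩⟩
      rw [if_congr this.symm rfl rfl]
  -- part 3: groups i > c
  have hp3 : (PySem.List.pyRange (c + 1) n 1).flatMap (fun i =>
        ((PySem.List.pyRange (i + 1) n 1).map (fun j => (i, j))).flatMap (fun a =>
          (List.filter (fun q => q.1 == c) (opf dices a)).map (fun q => q.2)))
      = [] := by
    apply List.flatMap_eq_nil_iff.mpr
    intro i hi
    rw [PySem.List.mem_pyRange_one] at hi
    apply List.flatMap_eq_nil_iff.mpr
    intro q hq
    obtain ⟨j, hj, rfl⟩ := List.mem_map.mp hq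
    rw [PySem.List.mem_pyRange_one] at hj
    rw [opf_filter_eval dices c i j (by omega), if_neg (by omega), if_neg (by omega)]
  rw [hp1, hp2, hp3, List.append_nil]

lemma stepA_eq (dices : List (List Int)) (d : PySem.Dict Int (List (Int × Int))) (p : Int × Int) :
    (let wins := count_wins (PySem.List.pyGetD dices p.1 []) (PySem.List.pyGetD dices p.2 [])
     let d := if wins.1 < wins.2 then d.modify p.1 [] (fun l => l ++ [(p.2, wins.2)]) else d
     if wins.2 < wins.1 then d.modify p.2 [] (fun l => l ++ [(p.1, wins.1)]) else d)
      = (opf dices p).foldl (fun d q => d.modify q.1 [] (fun l => l ++ [q.2])) d := by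
  unfold opf
  rw [count_wins_eq]
  simp only [fW]
  by_cases h1 : pairWins (PySem.List.pyGetD dices p.1 []) (PySem.List.pyGetD dices p.2 [])
      < pairWins (PySem.List.pyGetD dices p.2 []) (PySem.List.pyGetD dices p.1 [])
  · have h2 : ¬ pairWins (PySem.List.pyGetD dices p.2 []) (PySem.List.pyGetD dices p.1 [])
        < pairWins (PySem.List.pyGetD dices p.1 []) (PySem.List.pyGetD dices p.2 []) := by omega
    simp [h1, h2]
  · by_cases h2 : pairWins (PySem.List.pyGetD dices p.2 []) (PySem.List.pyGetD dices p.1 [])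
        < pairWins (PySem.List.pyGetD dices p.1 []) (PySem.List.pyGetD dices p.2 [])
    · simp [h1, h2]
    · simp [h1, h2]

lemma set_mem_update_right {s : PySem.Set Int} {xs : List Int} {y : Int} (h : y ∈ xs) :
    y ∈ PySem.Set.update s xs := by
  by_cases hs : y ∈ s
  · simp [PySem.Set.update_eq_append_filter, hs]
  · rw [PySem.Set.update_eq_append_filter]
    refine List.mem_append_right _ (List.mem_filter.mpr ⟨(PySem.Set.mem_ofList xs y).mpr h, ?_⟩)
    simp [hs]

lemma set_update_absorb (s : PySem.Set Int) (xs : List Int) (h : ∀ x ∈ xs, x ∈ s) :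
    PySem.Set.update s xs = s := by
  rw [PySem.Set.update_eq_append_filter]
  have : (PySem.Set.ofList xs).filter (fun y => !s.contains y) = [] := by
    apply List.filter_eq_nil_iff.mpr
    intro y hy
    simp [h y ((PySem.Set.mem_ofList xs y).mp hy)]
  rw [this, List.append_nil]

lemma dicts_eq (dices : List (List Int)) (lt : List (Int × List (Int × Int)))
    (hnd : (lt.map Prod.fst).Nodup) :
    ((combPairs (dices.length : Int)).foldl (fun d p =>
        let wins := count_wins (PySem.List.pyGetD dices p.1 []) (PySem.List.pyGetD dices p.2 [])
        let d := if wins.1 < wins.2 then d.modify p.1 [] (fun l => l ++ [(p.2, wins.2)]) else d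
        if wins.2 < wins.1 then d.modify p.2 [] (fun l => l ++ [(p.1, wins.1)]) else d)
      ((PySem.List.pyRange 0 (dices.length : Int) 1).foldl
        (fun d i => d.insert i ([] : List (Int × Int))) (PySem.Dict.mk lt)))
    = ((PySem.List.pyRange 0 (dices.length : Int) 1).foldl
        (fun d i => d.insert i (lossList dices (dices.length : Int) i)) (PySem.Dict.mk lt)) := by
  set n : Int := (dices.length : Int) with hn
  have hstep : (fun (d : PySem.Dict Int (List (Int × Int))) (p : Int × Int) =>
      let wins := count_wins (PySem.List.pyGetD dices p.1 []) (PySem.List.pyGetD dices p.2 [])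
      let d := if wins.1 < wins.2 then d.modify p.1 [] (fun l => l ++ [(p.2, wins.2)]) else d
      if wins.2 < wins.1 then d.modify p.2 [] (fun l => l ++ [(p.1, wins.1)]) else d)
      = fun d p => (opf dices p).foldl (fun d q => d.modify q.1 [] (fun l => l ++ [q.2])) d := by
    funext d p
    exact stepA_eq dices d p
  rw [hstep, ← List.foldl_flatMap,
    show (combPairs n).flatMap (opf dices) = opsList dices n from rfl]
  have hk0 : (PySem.Dict.mk lt).keys = lt.map Prod.fst := rfl
  have hkA1 := PySem.Dict.keys_foldl_insert (PySem.List.pyRange 0 n 1)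
      (fun _ _ => ([] : List (Int × Int))) (PySem.Dict.mk lt)
  have hndA1 : ((PySem.List.pyRange 0 n 1).foldl
      (fun d i => d.insert i ([] : List (Int × Int))) (PySem.Dict.mk lt)).keys.Nodup :=
    PySem.Dict.nodup_keys_foldl_insert _ _ _ (hk0 ▸ hnd)
  have hkA2 := PySem.Dict.keys_foldl_modify_key (opsList dices n) Prod.fst []
      (fun _ q => fun l => l ++ [q.2])
      ((PySem.List.pyRange 0 n 1).foldl
        (fun d i => d.insert i ([] : List (Int × Int))) (PySem.Dict.mk lt))
  have hndA2 : ((opsList dices n).foldl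
      (fun d q => d.modify q.1 [] (fun l => l ++ [q.2]))
      ((PySem.List.pyRange 0 n 1).foldl
        (fun d i => d.insert i ([] : List (Int × Int))) (PySem.Dict.mk lt))).keys.Nodup :=
    PySem.Dict.nodup_keys_foldl_modify_key _ _ _ _ _ hndA1
  have hkB := PySem.Dict.keys_foldl_insert (PySem.List.pyRange 0 n 1)
      (fun _ i => lossList dices n i) (PySem.Dict.mk lt)
  have hndB : ((PySem.List.pyRange 0 n 1).foldl
      (fun d i => d.insert i (lossList dices n i)) (PySem.Dict.mk lt)).keys.Nodup :=
    PySem.Dict.nodup_keys_foldl_insert _ _ _ (hk0 ▸ hnd)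
  have habsorb : PySem.Set.update
      (PySem.Set.update (PySem.Dict.mk lt).keys (PySem.List.pyRange 0 n 1))
      ((opsList dices n).map Prod.fst)
      = PySem.Set.update (PySem.Dict.mk lt).keys (PySem.List.pyRange 0 n 1) := by
    apply set_update_absorb
    intro x hx
    obtain ⟨q, hq, rfl⟩ := List.mem_map.mp hx
    have := opsList_key_mem dices n q hq
    exact set_mem_update_right (PySem.List.mem_pyRange_one.mpr (by omega))
  apply PySem.Dict.ext
  rw [PySem.Dict.items_eq_map_keys _ hndA2 [], PySem.Dict.items_eq_map_keys _ hndB []]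
  rw [hkA2, hkA1, habsorb, hkB]
  apply List.map_congr_left
  intro k _hk
  have hgA : (((opsList dices n).foldl
      (fun d q => d.modify q.1 [] (fun l => l ++ [q.2]))
      ((PySem.List.pyRange 0 n 1).foldl
        (fun d i => d.insert i ([] : List (Int × Int))) (PySem.Dict.mk lt)))).getD k []
      = ((PySem.List.pyRange 0 n 1).foldl
        (fun d i => d.insert i ([] : List (Int × Int))) (PySem.Dict.mk lt)).getD k []
        ++ ((opsList dices n).filter (fun q => q.1 == k)).map (fun q => q.2) :=
    PySem.Dict.getD_foldl_modify_append _ _ _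
  rw [hgA, getD_foldl_insert_fun _ (fun _ => ([] : List (Int × Int))),
    getD_foldl_insert_fun _ (fun i => lossList dices n i)]
  by_cases hkR : k ∈ PySem.List.pyRange 0 n 1
  · rw [if_pos hkR, if_pos hkR]
    rw [PySem.List.mem_pyRange_one] at hkR
    rw [ops_filter dices n k hkR.1 hkR.2, List.nil_append]
  · rw [if_neg hkR, if_neg hkR]
    rw [PySem.List.mem_pyRange_one] at hkR
    rw [ops_filter_out dices n k (by omega)]
    simp

-- the sorted-faces lookup: S[i] = sorted(dices[i]) for i in range
lemma S_getD (dices : List (List Int)) (i : Int)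
    (h0 : 0 ≤ i) (h1 : i < (dices.length : Int)) :
    PySem.List.pyGetD (dices.map (fun dice => PySem.List.sorted dice (fun x => x) false)) i []
      = PySem.List.sorted (PySem.List.pyGetD dices i []) (fun x => x) false := by
  rw [PySem.List.pyGetD_eq_getElem (dices.map (fun dice => PySem.List.sorted dice (fun x => x) false)) [] h0 (by simpa using h1),
    PySem.List.pyGetD_eq_getElem dices [] h0 h1]
  simp

lemma B_values (dices : List (List Int)) (lt : List (Int × List (Int × Int))) :
    find_the_best_dice_alt dices lt
      = (match ((PySem.List.pyRange 0 (dices.length : Int) 1).foldl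
            (fun d i => d.insert i (lossList dices (dices.length : Int) i))
            (PySem.Dict.mk lt)).items.find? (fun kv => kv.2.isEmpty) with
         | some kv => kv.1
         | none => -1) := by
  set n : Int := (dices.length : Int) with hn
  set S := dices.map (fun dice => PySem.List.sorted dice (fun x => x) false) with hS
  have hg : ∀ a b : Int, a ∈ PySem.List.pyRange 0 n 1 → b ∈ PySem.List.pyRange 0 n 1 →
      merge_wins (PySem.List.pyGetD S a []) (PySem.List.pyGetD S b []) 0 = fW dices a b := by
    intro a b ha hb
    rw [PySem.List.mem_pyRange_one] at ha hb
    rw [hS, S_getD dices a ha.1 ha.2, S_getD dices b hb.1 hb.2, merge_wins_sorted]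
    rfl
  have hfold : (PySem.List.pyRange 0 n 1).foldl (fun d i =>
      d.insert i (((PySem.List.pyRange 0 n 1).filter (fun j =>
          decide (j ≠ i ∧ merge_wins (PySem.List.pyGetD S i []) (PySem.List.pyGetD S j []) 0
            < merge_wins (PySem.List.pyGetD S j []) (PySem.List.pyGetD S i []) 0))).map
        (fun j => (j, merge_wins (PySem.List.pyGetD S j []) (PySem.List.pyGetD S i []) 0))))
      (PySem.Dict.mk lt)
      = (PySem.List.pyRange 0 n 1).foldl
          (fun d i => d.insert i (lossList dices n i)) (PySem.Dict.mk lt) := by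
    apply PySem.List.foldl_congr_mem
    intro d i hi
    congr 1
    unfold lossList
    have hfilter : (PySem.List.pyRange 0 n 1).filter (fun j =>
          decide (j ≠ i ∧ merge_wins (PySem.List.pyGetD S i []) (PySem.List.pyGetD S j []) 0
            < merge_wins (PySem.List.pyGetD S j []) (PySem.List.pyGetD S i []) 0))
        = (PySem.List.pyRange 0 n 1).filter
          (fun j => decide (j ≠ i ∧ fW dices i j < fW dices j i)) := by
      apply List.filter_congr
      intro j hj
      rw [hg i j hi hj, hg j i hj hi]
    rw [hfilter]
    apply List.map_congr_left
    intro j hj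
    have hmem := List.mem_filter.mp hj
    rw [hg j i hmem.1 hi]
  have hstart : find_the_best_dice_alt dices lt
      = (match ((PySem.List.pyRange 0 n 1).foldl (fun d i =>
          d.insert i (((PySem.List.pyRange 0 n 1).filter (fun j =>
              decide (j ≠ i ∧ merge_wins (PySem.List.pyGetD S i []) (PySem.List.pyGetD S j []) 0
                < merge_wins (PySem.List.pyGetD S j []) (PySem.List.pyGetD S i []) 0))).map
            (fun j => (j, merge_wins (PySem.List.pyGetD S j []) (PySem.List.pyGetD S i []) 0))))
          (PySem.Dict.mk lt)).items.find? (fun kv => kv.2.isEmpty) with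
         | some kv => kv.1
         | none => -1) := rfl
  rw [hstart, hfold]

lemma scan_eq (l : List (Int × List (Int × Int))) :
    findFirstEmptyA l
      = (match l.find? (fun kv => kv.2.isEmpty) with | some kv => kv.1 | none => -1) := by
  induction l with
  | nil => rfl
  | cons kv t ih =>
    obtain ⟨k, v⟩ := kv
    rw [findFirstEmptyA, List.find?_cons]
    by_cases hv : v.isEmpty
    · simp only [hv]
      rw [if_pos (by simpa [List.isEmpty_iff_length_eq_zero] using hv)]
    · simp only [hv]
      rw [if_neg (by simpa [List.isEmpty_iff_length_eq_zero] using hv), ih]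

-- ===== VERDICT (by name: the statement is the Claim_ definition above) =====
theorem find_the_best_dice_spec : Claim_equal_find_the_best_dice := by
  intro dices lt _hdom hpre
  unfold Spec_find_the_best_dice
  have hA : find_the_best_dice dices lt
      = findFirstEmptyA ((combPairs (dices.length : Int)).foldl (fun d p =>
          let wins := count_wins (PySem.List.pyGetD dices p.1 []) (PySem.List.pyGetD dices p.2 [])
          let d := if wins.1 < wins.2 then d.modify p.1 [] (fun l => l ++ [(p.2, wins.2)]) else d
          if wins.2 < wins.1 then d.modify p.2 [] (fun l => l ++ [(p.1, wins.1)]) else d)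
        ((PySem.List.pyRange 0 (dices.length : Int) 1).foldl
          (fun d i => d.insert i ([] : List (Int × Int))) (PySem.Dict.mk lt))).items := rfl
  rw [hA, dicts_eq dices lt hpre.2, scan_eq, B_values]
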